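-- pv_equiv track=rewrite | github.com/axmi-28/scifiGPT | data/gutenberg_scifi/prepare.py | strip_gutenberg_boilerplate
-- ===== SOURCE A (Python) =====
-- def strip_gutenberg_boilerplate(text: str) -> str:
--     """Remove common Project Gutenberg wrappers with simple line-marker rules."""
--     lines = text.splitlines()
--     start_idx = 0
--     end_idx = len(lines)
--
--     start_markers = (
--         "*** start of the project gutenberg",
--         "*** start of this project gutenberg",
--         "project gutenberg's",
--     )
--     end_markers = (
--         "*** end of the project gutenberg",
--         "*** end of this project gutenberg",
--         "end of the project gutenberg",
--     )
--
--     for idx, line in enumerate(lines):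
--         lowered = line.strip().lower()
--         if any(marker in lowered for marker in start_markers):
--             start_idx = idx + 1
--             break
--
--     for idx in range(len(lines) - 1, -1, -1):
--         lowered = lines[idx].strip().lower()
--         if any(marker in lowered for marker in end_markers):
--             end_idx = idx
--             break
--
--     if start_idx < end_idx:
--         return "\n".join(lines[start_idx:end_idx])
--     return text
-- ===== SOURCE B (Python) =====
-- def strip_gutenberg_boilerplate(text: str) -> str:
--     """Remove common Project Gutenberg wrappers in one forward pass."""
--     lines = text.splitlines()
--     start_markers = (
--         "*** start of the project gutenberg",
--         "*** start of this project gutenberg",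
--         "project gutenberg's",
--     )
--     end_markers = (
--         "*** end of the project gutenberg",
--         "*** end of this project gutenberg",
--         "end of the project gutenberg",
--     )
--     start_found = False
--     start_idx = 0
--     end_idx = len(lines)
--     for idx, line in enumerate(lines):
--         lowered = line.strip().lower()
--         if not start_found and any(m in lowered for m in start_markers):
--             start_found = True
--             start_idx = idx + 1
--         if any(m in lowered for m in end_markers):
--             end_idx = idx
--     if start_idx < end_idx:
--         return "\n".join(lines[start_idx:end_idx])
--     return text
-- ===== Notes on version B (the rewrite author's own statement) =====
-- stated objective: alternative
-- what changed: Replaces A's two directional scans (forward break-on-first for the start marker, backward break-on-first for the end marker) with a single forward pass over enumerate(lines) maintaining a start_found flag and overwriting end_idx so the last end-marker match survives.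
import Mathlib
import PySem

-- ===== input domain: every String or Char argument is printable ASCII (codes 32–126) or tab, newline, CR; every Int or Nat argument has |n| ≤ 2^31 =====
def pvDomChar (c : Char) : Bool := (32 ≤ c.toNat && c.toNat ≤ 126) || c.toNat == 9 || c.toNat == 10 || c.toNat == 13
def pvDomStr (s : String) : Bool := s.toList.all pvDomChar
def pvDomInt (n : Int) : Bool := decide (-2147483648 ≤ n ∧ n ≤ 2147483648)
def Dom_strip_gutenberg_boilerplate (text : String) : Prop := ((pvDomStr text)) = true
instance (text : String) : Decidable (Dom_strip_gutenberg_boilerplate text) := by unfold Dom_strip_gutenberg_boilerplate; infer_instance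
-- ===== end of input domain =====

-- B merges A's two directional marker scans into one forward pass with a start_found flag (objective: alternative decomposition).

-- ===== PORT A =====
-- shared marker tests (both Pythons use the same literal marker tuples)
def pvStartMarkers : List String :=
  ["*** start of the project gutenberg", "*** start of this project gutenberg", "project gutenberg's"]

def pvEndMarkers : List String :=
  ["*** end of the project gutenberg", "*** end of this project gutenberg", "end of the project gutenberg"]

def pvHitStart (line : String) : Bool :=
  pvStartMarkers.any (fun m => PySem.Str.isIn m (PySem.Str.lower (PySem.Str.strip line)))

def pvHitEnd (line : String) : Bool :=
  pvEndMarkers.any (fun m => PySem.Str.isIn m (PySem.Str.lower (PySem.Str.strip line)))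

-- A's first loop: forward over enumerate(lines), break on the first start-marker hit
def pvFindStartA : List (Int × String) → Int
  | [] => 0
  | (i, l) :: rest => if pvHitStart l then i + 1 else pvFindStartA rest

-- A's second loop: over range(len(lines)-1, -1, -1), break on the first end-marker hit
def pvFindEndA (lines : List String) : List Int → Int
  | [] => (lines.length : Int)
  | i :: rest => if pvHitEnd (PySem.List.pyGetD lines i "") then i else pvFindEndA lines rest

def strip_gutenberg_boilerplate (text : String) : String :=
  let lines := PySem.Str.splitlines text
  let start_idx := pvFindStartA (PySem.List.enumerate lines 0)
  let end_idx := pvFindEndA lines (PySem.List.pyRange ((lines.length : Int) - 1) (-1) (-1))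
  if start_idx < end_idx then
    PySem.Str.join "\n" (PySem.List.slice lines (some start_idx) (some end_idx))
  else text

-- ===== PORT B =====
-- B's single-pass loop body: state = (start_found, start_idx, end_idx)
def pvStepB (s : Bool × Int × Int) (p : Int × String) : Bool × Int × Int :=
  let s1 := if !s.1 && pvHitStart p.2 then (true, p.1 + 1, s.2.2) else s
  if pvHitEnd p.2 then (s1.1, s1.2.1, p.1) else s1

def strip_gutenberg_boilerplate_alt (text : String) : String :=
  let lines := PySem.Str.splitlines text
  let st := (PySem.List.enumerate lines 0).foldl pvStepB (false, 0, (lines.length : Int))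
  if st.2.1 < st.2.2 then
    PySem.Str.join "\n" (PySem.List.slice lines (some st.2.1) (some st.2.2))
  else text

-- ===== PRECONDITION & SPEC =====
def Spec_strip_gutenberg_boilerplate (text : String) (out : String) : Prop := out = strip_gutenberg_boilerplate_alt text
instance (text : String) (out : String) : Decidable (Spec_strip_gutenberg_boilerplate text out) := by unfold Spec_strip_gutenberg_boilerplate; infer_instance

-- ===== CLAIM (what is proved, stated in full; the proofs are below) =====
def Claim_equal_strip_gutenberg_boilerplate : Prop := ∀ (text : String), Dom_strip_gutenberg_boilerplate text → Spec_strip_gutenberg_boilerplate text (strip_gutenberg_boilerplate text)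

-- ===== LEMMAS AND PROOFS =====

-- first start match with a general default (generalization of pvFindStartA)
def pvFirstStartD : List (Int × String) → Int → Int
  | [], d => d
  | (i, l) :: rest, d => if pvHitStart l then i + 1 else pvFirstStartD rest d

-- first end match with a general default (generalization of pvFindEndA)
def pvFindEndD (lines : List String) : List Int → Int → Int
  | [], d => d
  | i :: rest, d => if pvHitEnd (PySem.List.pyGetD lines i "") then i else pvFindEndD lines rest d

lemma pvFindStartA_eq (l : List (Int × String)) : pvFindStartA l = pvFirstStartD l 0 := by
  induction l with
  | nil => rfl
  | cons p rest ih => cases p with | mk i s => simp [pvFindStartA, pvFirstStartD, ih]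

lemma pvFindEndA_eq (lines : List String) (is : List Int) :
    pvFindEndA lines is = pvFindEndD lines is (lines.length : Int) := by
  induction is with
  | nil => rfl
  | cons i rest ih => simp [pvFindEndA, pvFindEndD, ih]

lemma pvFindEndD_append_singleton (lines : List String) (zs : List Int) (i d : Int) :
    pvFindEndD lines (zs ++ [i]) d
      = pvFindEndD lines zs (if pvHitEnd (PySem.List.pyGetD lines i "") then i else d) := by
  induction zs with
  | nil => simp [pvFindEndD]
  | cons j rest ih => simp [pvFindEndD, ih]

lemma pvFindEndD_reverse (lines : List String) (ys : List Int) (d : Int) :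
    pvFindEndD lines ys.reverse d
      = ys.foldl (fun acc i => if pvHitEnd (PySem.List.pyGetD lines i "") then i else acc) d := by
  induction ys generalizing d with
  | nil => rfl
  | cons i rest ih =>
      simp [List.reverse_cons, pvFindEndD_append_singleton, ih, List.foldl_cons]

-- characterization of B's single fold: start component = first start match, end component = last end match
lemma pvFoldB_spec (l : List (Int × String)) (f0 : Bool) (st0 en0 : Int) :
    l.foldl pvStepB (f0, st0, en0)
      = (f0 || l.any (fun p => pvHitStart p.2),
         if f0 then st0 else pvFirstStartD l st0,
         l.foldl (fun acc p => if pvHitEnd p.2 then p.1 else acc) en0) := by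
  induction l generalizing f0 st0 en0 with
  | nil => simp [pvFirstStartD]
  | cons p rest ih =>
      cases p with
      | mk i s =>
        simp only [List.foldl_cons, pvStepB]
        by_cases hf : f0 <;> by_cases hs : pvHitStart s <;> by_cases he : pvHitEnd s <;>
          simp [hf, hs, he, ih, pvFirstStartD, List.any_cons]

lemma pvEnd_eq (lines : List String) (d : Int) :
    pvFindEndD lines (PySem.List.pyRange ((lines.length : Int) - 1) (-1) (-1)) d
      = (PySem.List.enumerate lines 0).foldl (fun acc p => if pvHitEnd p.2 then p.1 else acc) d := by
  have hrev : PySem.List.pyRange ((lines.length : Int) - 1) (-1) (-1)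
      = (PySem.List.pyRange 0 (lines.length : Int) 1).reverse := by
    rw [PySem.List.pyRange_neg_one_eq_reverse]
    norm_num
  rw [hrev, pvFindEndD_reverse]
  rw [PySem.List.enumerate_eq_map_pyRange lines ""]
  rw [List.foldl_map]
  simp [PySem.List.len]

-- ===== VERDICT (by name: the statement is the Claim_ definition above) =====
theorem strip_gutenberg_boilerplate_spec : Claim_equal_strip_gutenberg_boilerplate := by
  intro text _
  unfold Spec_strip_gutenberg_boilerplate strip_gutenberg_boilerplate strip_gutenberg_boilerplate_alt
  simp only [pvFoldB_spec, pvFindStartA_eq, pvFindEndA_eq, pvEnd_eq, Bool.false_eq_true, if_false]
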